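-- pv_equiv track=rewrite | github.com/adminlornell/datacollection | src/enrichment/tools/sec_edgar_tool.py | _find_best_match
-- ===== SOURCE A (Python) =====
-- from typing import Type, Any, Optional, List, ClassVar, Dict
--
-- def _find_best_match(companies: List[dict], search_name: str) -> Optional[dict]:
--     """Find the best matching company."""
--     if not companies:
--         return None
--
--     search_lower = search_name.lower().strip()
--
--     # Exact match
--     for c in companies:
--         if c["name"].lower().strip() == search_lower:
--             return c
--
--     # Contains match
--     for c in companies:
--         if search_lower in c["name"].lower():
--             return c
--
--     return companies[0] if companies else None
-- ===== SOURCE B (Python) =====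
-- def _find_best_match(companies, search_name):
--     """Single pass: return the first exact match immediately; remember the
--     first contains-match; fall back to companies[0]."""
--     if not companies:
--         return None
--
--     search_lower = search_name.lower().strip()
--
--     first_contains = None
--     for c in companies:
--         name_lower = c["name"].lower()
--         if name_lower.strip() == search_lower:
--             return c
--         if first_contains is None and search_lower in name_lower:
--             first_contains = c
--
--     return first_contains if first_contains is not None else companies[0]
-- ===== Notes on version B (the rewrite author's own statement) =====
-- stated objective: alternative
-- what changed: Replaces A's two sequential scans (exact pass, then contains pass) with a single fused scan that returns an exact match immediately and remembers the first contains-match in one variable.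
import Mathlib
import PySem

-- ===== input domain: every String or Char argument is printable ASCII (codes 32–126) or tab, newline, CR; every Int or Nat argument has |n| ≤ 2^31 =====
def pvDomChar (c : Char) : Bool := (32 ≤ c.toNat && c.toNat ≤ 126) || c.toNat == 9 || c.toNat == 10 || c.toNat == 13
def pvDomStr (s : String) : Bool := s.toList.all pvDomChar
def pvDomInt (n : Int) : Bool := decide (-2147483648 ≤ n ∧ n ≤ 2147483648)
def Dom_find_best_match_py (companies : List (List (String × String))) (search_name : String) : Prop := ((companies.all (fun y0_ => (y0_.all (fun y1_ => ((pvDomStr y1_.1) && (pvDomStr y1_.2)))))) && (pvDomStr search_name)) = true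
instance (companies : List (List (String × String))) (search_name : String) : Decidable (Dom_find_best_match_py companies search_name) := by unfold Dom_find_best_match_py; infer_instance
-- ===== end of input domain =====

-- B fuses A's two sequential scans (exact pass, then contains pass) into one scan
-- that returns an exact match immediately and remembers the first contains-match.


-- ===== PORT A =====
-- c["name"]: Pre_ guarantees the key is present, so the default is never used
def pvNameA (c : List (String × String)) : String :=
  PySem.Dict.getD (PySem.Dict.mk c) "name" ""

-- first loop of A: exact match on lower().strip()
def pvExactLoop (sl : String) : List (List (String × String)) → Option (List (String × String))
  | [] => none
  | c :: rest =>
    if PySem.Str.strip (PySem.Str.lower (pvNameA c)) = sl then some c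
    else pvExactLoop sl rest

-- second loop of A: substring match on lower() (no strip)
def pvContainsLoop (sl : String) : List (List (String × String)) → Option (List (String × String))
  | [] => none
  | c :: rest =>
    if PySem.Str.isIn sl (PySem.Str.lower (pvNameA c)) then some c
    else pvContainsLoop sl rest

def find_best_match_py (companies : List (List (String × String))) (search_name : String) : Option (List (String × String)) :=
  if companies = [] then none
  else
    match pvExactLoop (PySem.Str.strip (PySem.Str.lower search_name)) companies with
    | some c => some c
    | none =>
      match pvContainsLoop (PySem.Str.strip (PySem.Str.lower search_name)) companies with
      | some c => some c
      | none => companies.head?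

-- ===== PORT B =====
-- single fused scan: immediate return on exact match, accumulator for first contains-match
def pvScan (sl : String) : List (List (String × String)) → Option (List (String × String)) → Option (List (String × String))
  | [], first_contains => first_contains
  | c :: rest, first_contains =>
    let name_lower := PySem.Str.lower (pvNameA c)
    if PySem.Str.strip name_lower = sl then some c
    else if first_contains.isNone && PySem.Str.isIn sl name_lower then
      pvScan sl rest (some c)
    else pvScan sl rest first_contains

def find_best_match_py_alt (companies : List (List (String × String))) (search_name : String) : Option (List (String × String)) :=
  if companies = [] then none
  else
    match pvScan (PySem.Str.strip (PySem.Str.lower search_name)) companies none with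
    | some c => some c
    | none => companies.head?

-- ===== PRECONDITION & SPEC =====
-- Pre_ excludes exactly the inputs on which A raises KeyError: some company dict lacks the
-- key "name" and no earlier company is an exact (lower/strip) match for the search name.
def Pre_find_best_match_py (companies : List (List (String × String))) (search_name : String) : Prop :=
  ∀ i < companies.length, "name" ∉ (companies.getD i []).map Prod.fst →
    ∃ j < i, PySem.Str.strip (PySem.Str.lower (PySem.Dict.getD (PySem.Dict.mk (companies.getD j [])) "name" "")) = PySem.Str.strip (PySem.Str.lower search_name)
instance (companies : List (List (String × String))) (search_name : String) : Decidable (Pre_find_best_match_py companies search_name) := by unfold Pre_find_best_match_py; infer_instance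

def pvWitness_find_best_match_py : (List (List (String × String))) × String :=
  ([[("name", "Acme Inc"), ("cik", "0000123")], [("name", "Beta Corp")]], "acme")

def Spec_find_best_match_py (companies : List (List (String × String))) (search_name : String) (out : Option (List (String × String))) : Prop := out = find_best_match_py_alt companies search_name
instance (companies : List (List (String × String))) (search_name : String) (out : Option (List (String × String))) : Decidable (Spec_find_best_match_py companies search_name out) := by unfold Spec_find_best_match_py; infer_instance

-- ===== CLAIM (what is proved, stated in full; the proofs are below) =====
def Claim_equal_find_best_match_py : Prop := ∀ (companies : List (List (String × String))) (search_name : String), Dom_find_best_match_py companies search_name → Pre_find_best_match_py companies search_name → Spec_find_best_match_py companies search_name (find_best_match_py companies search_name)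

-- ===== LEMMAS AND PROOFS =====

-- The fused scan equals: exact-loop result, else the accumulator, else the contains-loop result.
theorem pvScan_eq (sl : String) (cs : List (List (String × String))) (fc : Option (List (String × String))) :
    pvScan sl cs fc =
      match pvExactLoop sl cs with
      | some c => some c
      | none =>
        match fc with
        | some c' => some c'
        | none => pvContainsLoop sl cs := by
  induction cs generalizing fc with
  | nil => cases fc <;> simp [pvScan, pvExactLoop, pvContainsLoop]
  | cons c rest ih =>
    simp only [pvScan, pvExactLoop, pvContainsLoop, pvNameA]
    by_cases hexact : PySem.Str.strip (PySem.Str.lower (PySem.Dict.getD (PySem.Dict.mk c) "name" "")) = sl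
    · simp [hexact]
    · rw [if_neg hexact, if_neg hexact]
      cases fc with
      | some c' =>
        rw [if_neg (by simp), ih]
      | none =>
        by_cases hin : PySem.Str.isIn sl (PySem.Str.lower (PySem.Dict.getD (PySem.Dict.mk c) "name" "")) = true
        · rw [if_pos (by simpa using hin), ih, if_pos hin]
        · rw [if_neg (by simpa using hin), ih, if_neg hin]

-- ===== VERDICT (by name: the statement is the Claim_ definition above) =====
theorem find_best_match_py_spec : Claim_equal_find_best_match_py := by
  intro companies search_name _ _
  unfold Spec_find_best_match_py find_best_match_py find_best_match_py_alt
  by_cases h : companies = []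
  · simp [h]
  · rw [if_neg h, if_neg h, pvScan_eq]
    cases pvExactLoop (PySem.Str.strip (PySem.Str.lower search_name)) companies with
    | some c => rfl
    | none => cases pvContainsLoop (PySem.Str.strip (PySem.Str.lower search_name)) companies <;> rfl
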